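-- pv_equiv track=rewrite | github.com/neuroethology/MARS | mars_v1_8/MARS_feature_machinery.py | expanding_window
-- ===== SOURCE A (Python) =====
-- from itertools import islice
--
-- def expanding_window(seq, final_n):
--     """ Returns an expanding window over data until it reaches a certain width"""
--     "   s -> (s0), (s0,s1), (s0,s1,s2), ... "
--     it = iter(seq[:final_n])
--     result = tuple(islice(it, 1))
--     if len(result) == 1:
--         yield result
--     for elem in it:
--         result = result + (elem,)
--         yield result
-- ===== SOURCE B (Python) =====
-- def expanding_window(seq, final_n):
--     """ Returns an expanding window over data until it reaches a certain width"""
--     s = tuple(seq[:final_n])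
--     for i in range(len(s)):
--         yield s[:i + 1]
-- ===== Notes on version B (the rewrite author's own statement) =====
-- stated objective: simpler
-- what changed: B snapshots the prefix once and yields each window by re-slicing s[:i+1] over an index loop, removing A's incrementally concatenated accumulator tuple and the islice/first-element special case.
import Mathlib
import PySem

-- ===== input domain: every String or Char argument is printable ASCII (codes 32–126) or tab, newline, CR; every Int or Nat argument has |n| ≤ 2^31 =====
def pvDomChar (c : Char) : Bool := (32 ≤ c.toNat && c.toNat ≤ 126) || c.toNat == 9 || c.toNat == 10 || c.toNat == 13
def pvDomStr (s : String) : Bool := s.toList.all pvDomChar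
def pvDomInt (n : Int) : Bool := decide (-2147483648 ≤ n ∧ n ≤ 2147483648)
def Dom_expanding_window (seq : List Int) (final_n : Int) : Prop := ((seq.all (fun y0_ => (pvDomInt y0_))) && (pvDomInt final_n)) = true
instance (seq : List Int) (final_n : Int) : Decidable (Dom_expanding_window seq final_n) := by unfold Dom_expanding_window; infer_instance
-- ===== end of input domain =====

-- B snapshots the prefix once and yields each window by slicing s[:i+1] over an index loop,
-- replacing A's incrementally concatenated accumulator tuple and its first-element special case (simpler).


-- ===== PORT A =====
-- it = iter(seq[:final_n]); result = tuple(islice(it, 1)); yield it if nonempty;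
-- then fold over the rest of it, growing result by one element and yielding each value.
def expanding_window (seq : List Int) (final_n : Int) : List (List Int) :=
  match PySem.List.slice seq none (some final_n) with
  | [] => []
  | x :: rest =>
    (rest.foldl (fun (st : List (List Int) × List Int) elem =>
        let result := st.2 ++ [elem]
        (st.1 ++ [result], result)) ([[x]], [x])).1

-- ===== PORT B =====
-- s = seq[:final_n]; for i in range(len(s)): yield tuple(s[:i+1])
def expanding_window_alt (seq : List Int) (final_n : Int) : List (List Int) :=
  let s := PySem.List.slice seq none (some final_n)
  (List.range s.length).map (fun (i : Nat) => PySem.List.slice s none (some ((i : Int) + 1)))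

-- ===== PRECONDITION & SPEC =====
def Spec_expanding_window (seq : List Int) (final_n : Int) (out : List (List Int)) : Prop := out = expanding_window_alt seq final_n
instance (seq : List Int) (final_n : Int) (out : List (List Int)) : Decidable (Spec_expanding_window seq final_n out) := by unfold Spec_expanding_window; infer_instance

-- ===== CLAIM (what is proved, stated in full; the proofs are below) =====
def Claim_equal_expanding_window : Prop := ∀ (seq : List Int) (final_n : Int), Dom_expanding_window seq final_n → Spec_expanding_window seq final_n (expanding_window seq final_n)

-- ===== LEMMAS AND PROOFS =====

-- Invariant of A's loop: the emitted list is `out` followed by all prefixes of `rest` appended to `r`.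

theorem ew_loop (rest : List Int) : ∀ (out : List (List Int)) (r : List Int),
    (rest.foldl (fun (st : List (List Int) × List Int) elem =>
        let result := st.2 ++ [elem]
        (st.1 ++ [result], result)) (out, r)).1
      = out ++ (List.range rest.length).map (fun i => r ++ rest.take (i + 1)) := by
  induction rest with
  | nil => simp
  | cons e rest ih =>
    intro out r
    simp only [List.foldl_cons, ih]
    simp [List.range_succ_eq_map, List.map_map, Function.comp, List.take_succ_cons,
      List.append_assoc]

theorem ew_alt_take (s : List Int) :
    (List.range s.length).map (fun (i : Nat) => PySem.List.slice s none (some ((i : Int) + 1)))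
      = (List.range s.length).map (fun i => s.take (i + 1)) := by
  apply List.map_congr_left
  intro i _
  have := PySem.List.slice_to_natCast s (i + 1)
  simpa [Int.natCast_add] using this

theorem expanding_window_spec : Claim_equal_expanding_window := by
  intro seq final_n _
  unfold Spec_expanding_window expanding_window expanding_window_alt
  cases h : PySem.List.slice seq none (some final_n) with
  | nil => simp
  | cons x rest =>
    rw [ew_alt_take]
    dsimp only
    rw [ew_loop]
    simp [List.range_succ_eq_map, List.map_map, Function.comp, List.take_succ_cons]
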